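-- pv_equiv track=rewrite | github.com/ChesterLen/Programming-Fundamentals---Python | Text Processing - Exercises/winning_ticket.py | valid_ticket
-- ===== SOURCE A (Python) =====
-- def valid_ticket(ticket):
--     if len(ticket) != 20:
--         return "invalid ticket"
--     symbols_list = ["@", "#", "$", "^"]
--     left_ticket_part = ticket[:10]
--     right_ticket_part = ticket[10:]
--     for symbol in symbols_list:
--         for uninterrupted_match_length in range(10, 5, -1):
--             winning_symbol_repetitions = symbol * uninterrupted_match_length
--             if winning_symbol_repetitions in left_ticket_part and winning_symbol_repetitions in right_ticket_part:
--                 if uninterrupted_match_length == 10: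
--                     return f'ticket "{ticket}" - {uninterrupted_match_length}{symbol} Jackpot!'
--                 return f'ticket "{ticket}" - {uninterrupted_match_length}{symbol}'
--     return f'ticket "{ticket}" - no match'
-- ===== SOURCE B (Python) =====
-- def _max_run(part, symbol):
--     best = cur = 0
--     for ch in part:
--         cur = cur + 1 if ch == symbol else 0
--         if cur > best:
--             best = cur
--     return best
--
--
-- def valid_ticket(ticket):
--     if len(ticket) != 20:
--         return "invalid ticket"
--     left_ticket_part = ticket[:10]
--     right_ticket_part = ticket[10:]
--     for symbol in "@#$^":
--         m = min(_max_run(left_ticket_part, symbol),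
--                 _max_run(right_ticket_part, symbol))
--         if m >= 6:
--             suffix = " Jackpot!" if m == 10 else ""
--             return f'ticket "{ticket}" - {m}{symbol}{suffix}'
--     return f'ticket "{ticket}" - no match'
-- ===== Notes on version B (the rewrite author's own statement) =====
-- stated objective: simpler
-- what changed: Replaces the countdown over candidate repetition lengths with repeated substring-containment tests by a single linear run-length scan of each half per symbol, returning min(left run, right run) when it is at least 6.
import Mathlib
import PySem

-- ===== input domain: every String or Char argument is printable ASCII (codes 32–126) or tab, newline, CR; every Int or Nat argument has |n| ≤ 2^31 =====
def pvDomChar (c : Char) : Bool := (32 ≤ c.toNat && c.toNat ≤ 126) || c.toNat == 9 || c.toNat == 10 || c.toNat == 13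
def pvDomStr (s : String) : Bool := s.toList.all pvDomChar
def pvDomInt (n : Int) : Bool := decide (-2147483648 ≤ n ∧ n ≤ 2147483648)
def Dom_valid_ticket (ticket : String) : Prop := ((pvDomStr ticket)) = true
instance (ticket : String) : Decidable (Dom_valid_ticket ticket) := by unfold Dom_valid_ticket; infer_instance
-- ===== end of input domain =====

-- B replaces A's countdown of substring-containment tests by one linear run-length scan of each half per symbol (objective: simpler).

-- ===== PORT A =====
def pvAmsg (ticket : String) (k : Int) (symbol : Char) : String :=
  if k == 10 then
    "ticket \"" ++ ticket ++ "\" - " ++ PySem.Int.toStr k ++ String.ofList [symbol] ++ " Jackpot!"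
  else
    "ticket \"" ++ ticket ++ "\" - " ++ PySem.Int.toStr k ++ String.ofList [symbol]

-- A's inner loop: for uninterrupted_match_length in range(10, 5, -1), with early return
def pvAinner (ticket : String) (left right : List Char) (symbol : Char) : List Int → Option String
  | [] => none
  | k :: ks =>
    let rep := PySem.List.pyRepeat [symbol] k
    if PySem.Chars.isIn rep left && PySem.Chars.isIn rep right then
      some (pvAmsg ticket k symbol)
    else pvAinner ticket left right symbol ks

-- A's outer loop over symbols_list, with early return
def pvAouter (ticket : String) (left right : List Char) : List Char → Option String
  | [] => none
  | s :: ss =>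
    match pvAinner ticket left right s (PySem.List.pyRange 10 5 (-1)) with
    | some r => some r
    | none => pvAouter ticket left right ss

def valid_ticket (ticket : String) : String :=
  if PySem.Str.len ticket ≠ 20 then "invalid ticket" else
  match pvAouter ticket (PySem.List.slice ticket.toList none (some 10))
      (PySem.List.slice ticket.toList (some 10) none) ['@', '#', '$', '^'] with
  | some r => r
  | none => "ticket \"" ++ ticket ++ "\" - no match"

-- ===== PORT B =====
-- B's helper _max_run: one linear scan tracking (best, cur)
def pvMaxRun (part : List Char) (symbol : Char) : Int :=
  (part.foldl (fun (p : Int × Int) ch =>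
      let cur := if ch == symbol then p.2 + 1 else 0
      (if cur > p.1 then cur else p.1, cur)) (0, 0)).1

def pvBmsg (ticket : String) (m : Int) (symbol : Char) (suffix : String) : String :=
  "ticket \"" ++ ticket ++ "\" - " ++ PySem.Int.toStr m ++ String.ofList [symbol] ++ suffix

-- B's loop over "@#$^", with early return
def pvBouter (ticket : String) (left right : List Char) : List Char → Option String
  | [] => none
  | s :: ss =>
    let m := min (pvMaxRun left s) (pvMaxRun right s)
    if 6 ≤ m then
      some (pvBmsg ticket m s (if m == 10 then " Jackpot!" else ""))
    else pvBouter ticket left right ss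

def valid_ticket_alt (ticket : String) : String :=
  if PySem.Str.len ticket ≠ 20 then "invalid ticket" else
  match pvBouter ticket (PySem.List.slice ticket.toList none (some 10))
      (PySem.List.slice ticket.toList (some 10) none) ['@', '#', '$', '^'] with
  | some r => r
  | none => "ticket \"" ++ ticket ++ "\" - no match"

-- ===== PRECONDITION & SPEC =====
def Spec_valid_ticket (ticket : String) (out : String) : Prop := out = valid_ticket_alt ticket
instance (ticket : String) (out : String) : Decidable (Spec_valid_ticket ticket out) := by unfold Spec_valid_ticket; infer_instance

-- ===== CLAIM (what is proved, stated in full; the proofs are below) =====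
def Claim_equal_valid_ticket : Prop := ∀ (ticket : String), Dom_valid_ticket ticket → Spec_valid_ticket ticket (valid_ticket ticket)

-- ===== LEMMAS AND PROOFS =====

-- length of the longest prefix of l consisting of symbol
def pvPreRun (ch : Char) : List Char → Nat
  | [] => 0
  | c :: t => if c = ch then pvPreRun ch t + 1 else 0

-- length of the longest run of symbol anywhere in l
def pvRun (ch : Char) : List Char → Nat
  | [] => 0
  | c :: t => max (pvPreRun ch (c :: t)) (pvRun ch t)

theorem pv_replicate_prefix_iff (ch : Char) (l : List Char) (k : Nat) :
    List.replicate k ch <+: l ↔ k ≤ pvPreRun ch l := by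
  induction l generalizing k with
  | nil =>
    cases k with
    | zero => simp [pvPreRun]
    | succ n => simp [List.replicate_succ, pvPreRun]
  | cons c t ih =>
    cases k with
    | zero => simp [pvPreRun]
    | succ n =>
      rw [List.replicate_succ, List.cons_prefix_cons]
      by_cases hc : c = ch
      · subst hc
        simp [pvPreRun, ih]
      · simp [pvPreRun, hc, Ne.symm hc]

theorem pv_replicate_infix_iff (ch : Char) (l : List Char) (k : Nat) :
    List.replicate k ch <:+: l ↔ k ≤ pvRun ch l := by
  induction l generalizing k with
  | nil =>
    cases k with
    | zero => simp [pvRun]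
    | succ n => simp [List.replicate_succ, pvRun]
  | cons c t ih =>
    rw [List.infix_cons_iff, pv_replicate_prefix_iff, ih, pvRun]
    omega

theorem pv_run_le_length (ch : Char) (l : List Char) : pvRun ch l ≤ l.length := by
  have h := (pv_replicate_infix_iff ch l (pvRun ch l)).mpr le_rfl
  have := h.length_le
  simpa using this

theorem pv_run_reverse (ch : Char) (l : List Char) : pvRun ch l.reverse = pvRun ch l := by
  have key : ∀ m : List Char, ∀ k : Nat,
      (List.replicate k ch <:+: m.reverse ↔ List.replicate k ch <:+: m) := by
    intro m k
    constructor
    · intro h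
      have := List.reverse_infix.mpr h
      simpa using this
    · intro h
      have : (List.replicate k ch).reverse <:+: m.reverse := List.reverse_infix.mpr h
      simpa using this
  apply Nat.le_antisymm
  · exact (pv_replicate_infix_iff ch l _).mp ((key l _).mp
      ((pv_replicate_infix_iff ch l.reverse _).mpr le_rfl))
  · exact (pv_replicate_infix_iff ch l.reverse _).mp ((key l _).mpr
      ((pv_replicate_infix_iff ch l _).mpr le_rfl))

-- B's fold computes (max run, suffix run) of the scanned part
theorem pv_fold_eq (ch : Char) (l : List Char) :
    l.foldl (fun (p : Int × Int) c =>
      let cur := if c == ch then p.2 + 1 else 0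
      (if cur > p.1 then cur else p.1, cur)) (0, 0)
      = ((pvRun ch l.reverse : Int), (pvPreRun ch l.reverse : Int)) := by
  induction l using List.reverseRecOn with
  | nil => simp [pvRun, pvPreRun]
  | append_singleton l x ih =>
    rw [List.foldl_append, ih]
    simp only [List.foldl_cons, List.foldl_nil, List.reverse_append, List.reverse_singleton,
      List.singleton_append]
    have hpre : pvPreRun ch (x :: l.reverse) = if x = ch then pvPreRun ch l.reverse + 1 else 0 :=
      rfl
    have hrun : pvRun ch (x :: l.reverse) = max (pvPreRun ch (x :: l.reverse)) (pvRun ch l.reverse) :=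
      rfl
    by_cases hx : x = ch
    · subst hx
      simp only [beq_self_eq_true, if_true, Prod.mk.injEq]
      rw [hrun, hpre, if_pos rfl]
      constructor
      · push_cast
        split_ifs <;> omega
      · push_cast
        ring
    · simp only [beq_iff_eq, hx, if_false, Prod.mk.injEq]
      rw [hrun, hpre]
      simp only [if_neg hx]
      constructor
      · push_cast
        split_ifs <;> omega
      · norm_num

theorem pv_maxRun_eq (ch : Char) (l : List Char) : pvMaxRun l ch = (pvRun ch l : Int) := by
  rw [pvMaxRun, pv_fold_eq, pv_run_reverse]

theorem pv_isIn_iff (ch : Char) (l : List Char) (k : Nat) :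
    PySem.Chars.isIn (PySem.List.pyRepeat [ch] (k : Int)) l = true ↔ k ≤ pvRun ch l := by
  rw [PySem.List.pyRepeat_singleton, PySem.Chars.isIn_iff_infix]
  simpa using pv_replicate_infix_iff ch l k

set_option maxHeartbeats 1000000 in
theorem pv_inner_eq (ticket : String) (ch : Char) (left right : List Char)
    (ha : pvRun ch left ≤ 10) :
    pvAinner ticket left right ch (PySem.List.pyRange 10 5 (-1)) =
      (let m := min (pvMaxRun left ch) (pvMaxRun right ch)
       if 6 ≤ m then some (pvBmsg ticket m ch (if m == 10 then " Jackpot!" else "")) else none) := by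
  have hrange : PySem.List.pyRange 10 5 (-1) = [10, 9, 8, 7, 6] := by decide
  have hm : min (pvMaxRun left ch) (pvMaxRun right ch)
      = ((min (pvRun ch left) (pvRun ch right) : Nat) : Int) := by
    rw [pv_maxRun_eq, pv_maxRun_eq]; push_cast; rfl
  set a := pvRun ch left with hadef
  set b := pvRun ch right with hbdef
  have hcond : ∀ k : Nat,
      (PySem.Chars.isIn (PySem.List.pyRepeat [ch] (k : Int)) left &&
       PySem.Chars.isIn (PySem.List.pyRepeat [ch] (k : Int)) right) = decide (k ≤ min a b) := by
    intro k
    apply Bool.eq_iff_iff.mpr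
    simp only [Bool.and_eq_true, decide_eq_true_iff, le_min_iff]
    rw [pv_isIn_iff, pv_isIn_iff]
  rw [hrange, hm]
  set m := min a b with hmdef
  have hm10 : m ≤ 10 := le_trans (min_le_left a b) ha
  have c10 := hcond 10
  have c9 := hcond 9
  have c8 := hcond 8
  have c7 := hcond 7
  have c6 := hcond 6
  simp only [Nat.cast_ofNat] at c10 c9 c8 c7 c6
  interval_cases m <;>
    simp only [pvAinner, c10, c9, c8, c7, c6, pvAmsg, pvBmsg] <;>
    norm_num [String.append_empty]

theorem pv_outer_eq (ticket : String) (left right : List Char)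
    (hl : left.length ≤ 10) (syms : List Char) :
    pvAouter ticket left right syms = pvBouter ticket left right syms := by
  induction syms with
  | nil => rfl
  | cons s ss ih =>
    rw [pvAouter, pvBouter,
      pv_inner_eq ticket s left right (le_trans (pv_run_le_length s left) hl)]
    by_cases h6 : 6 ≤ min (pvMaxRun left s) (pvMaxRun right s)
    · simp [h6]
    · simp [h6, ih]

-- ===== VERDICT (by name: the statement is the Claim_ definition above) =====
theorem valid_ticket_spec : Claim_equal_valid_ticket := by
  intro ticket _
  unfold Spec_valid_ticket valid_ticket valid_ticket_alt
  split_ifs with h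
  · rfl
  · have hlen : ticket.toList.length = 20 := by
      have := PySem.Str.len_eq ticket
      omega
    have h10 : (10 : Int) = ((10 : Nat) : Int) := rfl
    have hleft : PySem.List.slice ticket.toList none (some 10) = ticket.toList.take 10 := by
      rw [h10, PySem.List.slice_to_natCast]
    have hright : PySem.List.slice ticket.toList (some 10) none = ticket.toList.drop 10 := by
      rw [h10, PySem.List.slice_from_natCast]
    rw [pv_outer_eq]
    rw [hleft]; simp
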